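-- pv_equiv track=rewrite | github.com/GiseleN523/CS347-ShippingHazards | ai_server/ai_player/ai.py | getShipIndices
-- ===== SOURCE A (Python) =====
-- def getShipIndices(shipBoard, shipChar):
--     '''
--     Input: shipBoard and a character corresponding to a ship in the board
--     Output: a list of indices where that corresponding ship is located inside the board string
--     '''
--     shipIndices = []
--     index = 0
--     for char in shipBoard:
--         if char == shipChar:
--             shipIndices.append(index)
--         index = index+1
--     return shipIndices
-- ===== SOURCE B (Python) =====
-- def getShipIndices(shipBoard, shipChar):
--     '''
--     Input: shipBoard and a character corresponding to a ship in the board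
--     Output: a list of indices where that corresponding ship is located inside the board string
--     '''
--     positions = {}
--     for index, char in enumerate(shipBoard):
--         positions.setdefault(char, []).append(index)
--     return positions.get(shipChar, [])
-- ===== Notes on version B (the rewrite author's own statement) =====
-- stated objective: alternative
-- what changed: B replaces A's filtered per-character scan (equality test inside the loop) with grouping: it builds a char-to-indices dict index in one pass and answers with a single dict lookup, which naturally returns [] for empty or multi-character shipChar.
import Mathlib
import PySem

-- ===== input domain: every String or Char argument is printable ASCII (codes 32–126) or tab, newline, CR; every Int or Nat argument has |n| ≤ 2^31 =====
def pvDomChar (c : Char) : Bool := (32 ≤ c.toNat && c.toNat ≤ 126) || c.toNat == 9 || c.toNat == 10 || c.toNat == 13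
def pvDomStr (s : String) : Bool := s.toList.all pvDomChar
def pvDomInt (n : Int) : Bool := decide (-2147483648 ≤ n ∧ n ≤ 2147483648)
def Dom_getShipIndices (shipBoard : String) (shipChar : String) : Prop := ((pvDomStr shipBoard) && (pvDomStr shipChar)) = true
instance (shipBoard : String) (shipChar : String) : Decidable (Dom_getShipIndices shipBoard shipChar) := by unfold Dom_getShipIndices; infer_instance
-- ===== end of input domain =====

-- B groups indices into a char→indices dict in one pass and answers by a single lookup,
-- instead of A's filtered scan comparing each character; same return value on every input.


-- ===== PORT A =====
-- for char in shipBoard: iterates one-character strings; 'char == shipChar' is '[ch] = shipChar.toList'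
def getShipIndices (shipBoard : String) (shipChar : String) : List Int :=
  (shipBoard.toList.foldl
    (fun (st : List Int × Int) ch =>
      (if [ch] = shipChar.toList then st.1 ++ [st.2] else st.1, st.2 + 1))
    ([], 0)).1

-- ===== PORT B =====
-- 'positions.setdefault(char, []).append(index)' = positions[char] = positions.get(char, []) + [index]
def buildIndex (board : List Char) : PySem.Dict (List Char) (List Int) :=
  (PySem.List.enumerate board 0).foldl
    (fun d p => d.modify [p.2] [] (fun v => v ++ [p.1]))
    PySem.Dict.empty

def getShipIndices_alt (shipBoard : String) (shipChar : String) : List Int :=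
  (buildIndex shipBoard.toList).getD shipChar.toList []

-- ===== PRECONDITION & SPEC =====
def Spec_getShipIndices (shipBoard : String) (shipChar : String) (out : List Int) : Prop := out = getShipIndices_alt shipBoard shipChar
instance (shipBoard : String) (shipChar : String) (out : List Int) : Decidable (Spec_getShipIndices shipBoard shipChar out) := by unfold Spec_getShipIndices; infer_instance

-- ===== CLAIM (what is proved, stated in full; the proofs are below) =====
def Claim_equal_getShipIndices : Prop := ∀ (shipBoard : String) (shipChar : String), Dom_getShipIndices shipBoard shipChar → Spec_getShipIndices shipBoard shipChar (getShipIndices shipBoard shipChar)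

-- ===== LEMMAS AND PROOFS =====

-- canonical list of indices whose singleton matches the key, shared target of both characterizations
def occK (l : List Char) (key : List Char) (n : Int) : List Int :=
  match l with
  | [] => []
  | x :: xs => if [x] = key then n :: occK xs key (n + 1) else occK xs key (n + 1)

-- A's fold produces occK
lemma foldA_eq_occK (key : List Char) (l : List Char) (acc : List Int) (n : Int) :
    (l.foldl
      (fun (st : List Int × Int) ch =>
        (if [ch] = key then st.1 ++ [st.2] else st.1, st.2 + 1))
      (acc, n)).1 = acc ++ occK l key n := by
  induction l generalizing acc n with
  | nil => simp [occK]
  | cons x xs ih =>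
    rw [List.foldl_cons]
    by_cases hx : [x] = key
    · rw [if_pos hx, ih, occK, if_pos hx]
      simp
    · rw [if_neg hx, ih, occK, if_neg hx]

-- B's grouping fold, looked up at any key, produces occK
lemma foldB_eq_occK (key : List Char) (l : List Char) (n : Int)
    (d : PySem.Dict (List Char) (List Int)) :
    ((PySem.List.enumerate l n).foldl
      (fun d p => d.modify [p.2] [] (fun v => v ++ [p.1])) d).getD key []
    = d.getD key [] ++ occK l key n := by
  induction l generalizing n d with
  | nil => simp [PySem.List.enumerate_nil, occK]
  | cons x xs ih =>
    rw [PySem.List.enumerate_cons, List.foldl_cons, ih]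
    by_cases hx : [x] = key
    · subst hx
      rw [PySem.Dict.getD_modify_self, occK, if_pos rfl]
      simp
    · rw [PySem.Dict.getD_modify_of_ne _ _ _ (fun h => hx h.symm), occK, if_neg hx]

-- ===== VERDICT (by name: the statement is the Claim_ definition above) =====
theorem getShipIndices_spec : Claim_equal_getShipIndices := by
  intro sb sc _
  unfold Spec_getShipIndices getShipIndices getShipIndices_alt buildIndex
  rw [foldA_eq_occK sc.toList sb.toList [] 0, foldB_eq_occK sc.toList sb.toList 0 PySem.Dict.empty]
  simp [PySem.Dict.getD, PySem.Dict.get?, PySem.Dict.empty]
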